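-- pv_equiv track=rewrite | github.com/cognitivecomputations/spectrum | spectrum.py | _sort_weight_types
-- ===== SOURCE A (Python) =====
-- def _sort_weight_types(weight_types):
--     categories = {}
--     for wt in weight_types:
--         category = wt.split(".")[0]
--         categories.setdefault(category, []).append(wt)
--     sorted_categories = {
--         k: sorted(v)
--         for k, v in sorted(categories.items(), key=lambda item: item[0])
--     }
--     return [wt for sublist in sorted_categories.values() for wt in sublist]
-- ===== SOURCE B (Python) =====
-- def _sort_weight_types(weight_types):
--     return sorted(weight_types, key=lambda wt: (wt.split(".")[0], wt))
-- ===== Notes on version B (the rewrite author's own statement) =====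
-- stated objective: simpler
-- what changed: Replaces the category dict, the per-category sorted() calls and the flattening comprehension with one stable sort of the input keyed by (category prefix, full weight-type name).
import Mathlib
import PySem

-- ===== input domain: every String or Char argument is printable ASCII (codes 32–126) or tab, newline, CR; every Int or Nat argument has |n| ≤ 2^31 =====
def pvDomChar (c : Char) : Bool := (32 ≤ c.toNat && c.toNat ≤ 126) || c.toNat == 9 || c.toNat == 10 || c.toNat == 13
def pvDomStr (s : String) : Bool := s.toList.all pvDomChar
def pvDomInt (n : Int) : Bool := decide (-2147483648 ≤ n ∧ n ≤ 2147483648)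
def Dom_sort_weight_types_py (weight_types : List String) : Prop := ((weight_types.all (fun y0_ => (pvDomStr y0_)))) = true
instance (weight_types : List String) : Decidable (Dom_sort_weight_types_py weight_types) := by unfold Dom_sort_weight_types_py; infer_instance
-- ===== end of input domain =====

-- B replaces A's category dict + per-category sorts + flatten by ONE stable sort keyed by
-- (category prefix, full name); objective: simpler. Both are total; return values only (no mutation).

-- ===== PORT A =====
-- wt.split(".")[0]: splitting by a NON-EMPTY separator never raises and always yields a
-- non-empty list, so the `.getD` defaults below are never reached — the helper is exact.
def pyPrefix (wt : String) : String :=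
  (PySem.List.pyGet? ((PySem.Str.split? wt ".").getD []) 0).getD ""

def sort_weight_types_py (weight_types : List String) : List String :=
  let categories : PySem.Dict String (List String) :=
    weight_types.foldl
      (fun d wt => d.modify (pyPrefix wt) [] (fun v => v ++ [wt])) PySem.Dict.empty
  let sorted_categories : PySem.Dict String (List String) :=
    (PySem.List.sorted categories.items (fun item => item.1) false).foldl
      (fun d kv => d.insert kv.1 (PySem.List.sorted kv.2 (fun x => x) false)) PySem.Dict.empty
  sorted_categories.values.flatten

-- ===== PORT B =====
def sort_weight_types_py_alt (weight_types : List String) : List String :=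
  PySem.List.sorted2 weight_types (fun wt => pyPrefix wt) (fun wt => wt) false

-- ===== PRECONDITION & SPEC =====
def Spec_sort_weight_types_py (weight_types : List String) (out : List String) : Prop := out = sort_weight_types_py_alt weight_types
instance (weight_types : List String) (out : List String) : Decidable (Spec_sort_weight_types_py weight_types out) := by unfold Spec_sort_weight_types_py; infer_instance

-- ===== CLAIM (what is proved, stated in full; the proofs are below) =====
def Claim_equal_sort_weight_types_py : Prop := ∀ (weight_types : List String), Dom_sort_weight_types_py weight_types → Spec_sort_weight_types_py weight_types (sort_weight_types_py weight_types)

-- ===== LEMMAS AND PROOFS =====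

-- the composite sort key of B, as one lexicographic value
def wkey (wt : String) : Lex (String × String) := toLex (pyPrefix wt, wt)

theorem wkey_injective : Function.Injective wkey := by
  intro a b h
  have := congrArg (fun z => (ofLex z).2) h
  simpa [wkey] using this

theorem alt_eq_sorted (xs : List String) :
    sort_weight_types_py_alt xs = PySem.List.sorted xs wkey false := by
  unfold sort_weight_types_py_alt PySem.List.sorted2 PySem.List.sorted
  have hbe : (fun a b => decide (pyPrefix a < pyPrefix b) ||
        (!decide (pyPrefix b < pyPrefix a) && decide (a < b)))
      = (fun a b : String => decide (wkey a < wkey b)) := by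
    funext a b
    rcases lt_trichotomy (pyPrefix a) (pyPrefix b) with h | h | h
    · simp [wkey, Prod.Lex.toLex_lt_toLex, h, asymm h]
    · simp [wkey, Prod.Lex.toLex_lt_toLex, h]
    · simp [wkey, Prod.Lex.toLex_lt_toLex, h, asymm h, h.ne']
  simp only [Bool.false_eq_true, if_false, hbe]

theorem alt_perm (xs : List String) : (sort_weight_types_py_alt xs).Perm xs := by
  rw [alt_eq_sorted]; exact PySem.List.sorted_perm xs wkey false

theorem alt_pairwise (xs : List String) :
    (sort_weight_types_py_alt xs).Pairwise (fun a b => wkey a ≤ wkey b) := by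
  rw [alt_eq_sorted]; exact PySem.List.sorted_pairwise xs wkey

-- ---- A-side characterisation ----

-- inserting one extra element at the front of the k0-bucket permutes the flatten by a cons
theorem flatten_insert_one (K : List String) (k0 : String) (g : String → List String)
    (x : String) (hnd : K.Nodup) (hk : k0 ∈ K) :
    ((K.map (fun k => if k == k0 then x :: g k else g k)).flatten).Perm
      (x :: (K.map g).flatten) := by
  induction K with
  | nil => cases hk
  | cons k K' ih =>
    rcases List.mem_cons.mp hk with h | h
    · subst h
      simp only [List.map_cons, List.flatten_cons, beq_self_eq_true, if_pos]
      have hnot : ∀ c ∈ K', (c == k0) = false := by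
        intro c hc
        have : c ≠ k0 := by
          intro e; subst e; exact (List.nodup_cons.mp hnd).1 hc
        simpa using this
      have : K'.map (fun c => if c == k0 then x :: g c else g c) = K'.map g := by
        apply List.map_congr_left; intro c hc; simp [hnot c hc]
      rw [this]
      simp only [List.cons_append]
      exact List.Perm.refl _
    · have hne : (k == k0) = false := by
        have : k ≠ k0 := by
          intro e; subst e; exact (List.nodup_cons.mp hnd).1 h
        simpa using this
      simp only [List.map_cons, List.flatten_cons, hne, Bool.false_eq_true, if_false]
      have h1 := (ih (List.nodup_cons.mp hnd).2 h).append_left (g k)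
      exact h1.trans List.perm_middle

-- flattening the per-category filters of a covering, duplicate-free key list is a permutation
theorem partition_perm (xs : List String) (K : List String) (hnd : K.Nodup)
    (hcov : ∀ x ∈ xs, pyPrefix x ∈ K) :
    ((K.map (fun k => xs.filter (fun x => pyPrefix x == k))).flatten).Perm xs := by
  induction xs with
  | nil => simp
  | cons x rest ih =>
    have hx : pyPrefix x ∈ K := hcov x (List.mem_cons_self)
    have hrest : ∀ y ∈ rest, pyPrefix y ∈ K := fun y hy => hcov y (List.mem_cons_of_mem x hy)
    have hmap : K.map (fun k => (x :: rest).filter (fun z => pyPrefix z == k))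
        = K.map (fun k => if k == pyPrefix x
            then x :: rest.filter (fun z => pyPrefix z == k)
            else rest.filter (fun z => pyPrefix z == k)) := by
      apply List.map_congr_left; intro k hk
      by_cases h : k = pyPrefix x
      · subst h; simp
      · have h1 : (k == pyPrefix x) = false := by simpa using h
        have h2 : (pyPrefix x == k) = false := by simpa using (Ne.symm h)
        simp [h1, h2]

    rw [hmap]
    exact (flatten_insert_one K (pyPrefix x)
        (fun k => rest.filter (fun z => pyPrefix z == k)) x hnd hx).trans
      ((ih hrest).cons x)

-- the structured form of A's result
theorem a_eq_structured (xs : List String) :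
    sort_weight_types_py xs =
      ((PySem.List.sorted (PySem.Set.ofList (xs.map pyPrefix)) (fun x => x) false).map
        (fun k => PySem.List.sorted (xs.filter (fun x => pyPrefix x == k)) (fun x => x) false)).flatten := by
  unfold sort_weight_types_py
  show ((PySem.List.sorted (xs.foldl
        (fun d wt => d.modify (pyPrefix wt) [] (fun v => v ++ [wt])) PySem.Dict.empty).items
        (fun item => item.1) false).foldl
      (fun d kv => d.insert kv.1 (PySem.List.sorted kv.2 (fun x => x) false))
      PySem.Dict.empty).values.flatten = _
  set cats : PySem.Dict String (List String) :=
    xs.foldl (fun d wt => d.modify (pyPrefix wt) [] (fun v => v ++ [wt])) PySem.Dict.empty with hcats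
  set K : List String := PySem.Set.ofList (xs.map pyPrefix) with hK
  set SK : List String := PySem.List.sorted K (fun x => x) false with hSK
  have hkeys : cats.keys = K := by
    rw [hcats, PySem.Dict.keys_foldl_modify_key xs pyPrefix [] (fun _ wt v => v ++ [wt])]
    rfl
  have hnodup : cats.keys.Nodup := by rw [hkeys, hK]; exact PySem.Set.nodup_ofList _
  have hconv : ((xs.map (fun wt => (pyPrefix wt, wt))).foldl
      (fun (d : PySem.Dict String (List String)) p => d.modify p.1 [] (fun v => v ++ [p.2]))
      PySem.Dict.empty) = cats := by
    rw [List.foldl_map]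
  have hget : ∀ c, cats.getD c [] = xs.filter (fun x => pyPrefix x == c) := by
    intro c
    rw [← hconv, PySem.Dict.getD_foldl_modify_append]
    simp [List.filter_map, Function.comp_def]
  have hitems : cats.items = K.map (fun k => (k, xs.filter (fun x => pyPrefix x == k))) := by
    rw [PySem.Dict.items_eq_map_keys cats hnodup [], hkeys]
    exact List.map_congr_left (fun k _ => by rw [hget k])
  have hskpair : SK.Pairwise (· < ·) := by
    rw [hSK, hK]; exact PySem.List.sorted_ofList_pairwise_lt _
  have hsorteditems : PySem.List.sorted cats.items (fun item => item.1) false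
      = SK.map (fun k => (k, xs.filter (fun x => pyPrefix x == k))) := by
    apply PySem.List.sorted_eq_of_perm_of_pairwise_lt
    · rw [hitems]
      exact ((PySem.List.sorted_perm K (fun x => x) false).map _)
    · exact List.pairwise_map.mpr hskpair
  rw [hsorteditems]
  have hfresh : ∀ kv ∈ SK.map (fun k => (k, xs.filter (fun x => pyPrefix x == k))),
      (PySem.Dict.empty : PySem.Dict String (List String)).contains kv.1 = false :=
    fun kv _ => PySem.Dict.contains_empty kv.1
  have hnd2 : ((SK.map (fun k => (k, xs.filter (fun x => pyPrefix x == k)))).map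
      (fun kv : String × List String => kv.1)).Nodup := by
    rw [List.map_map]
    simpa [Function.comp_def] using hskpair.imp (fun h => ne_of_lt h)
  have hitems2 := PySem.Dict.items_foldl_insert_fresh
      (SK.map (fun k => (k, xs.filter (fun x => pyPrefix x == k))))
      (fun kv => kv.1) (fun kv => PySem.List.sorted kv.2 (fun x => x) false)
      PySem.Dict.empty hfresh hnd2
  show (((SK.map (fun k => (k, xs.filter (fun x => pyPrefix x == k)))).foldl
      (fun d kv => d.insert kv.1 (PySem.List.sorted kv.2 (fun x => x) false))
      PySem.Dict.empty).items.map (fun x => x.2)).flatten = _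
  rw [hitems2]
  simp [PySem.Dict.empty, List.map_map, Function.comp_def]

theorem a_perm (xs : List String) : (sort_weight_types_py xs).Perm xs := by
  rw [a_eq_structured]
  set K : List String := PySem.Set.ofList (xs.map pyPrefix) with hK
  set SK : List String := PySem.List.sorted K (fun x => x) false with hSK
  have step1 : ((SK.map (fun k =>
        PySem.List.sorted (xs.filter (fun x => pyPrefix x == k)) (fun x => x) false)).flatten).Perm
      ((SK.map (fun k => xs.filter (fun x => pyPrefix x == k))).flatten) := by
    apply List.Perm.flatten_congr
    rw [List.forall₂_map_left_iff, List.forall₂_map_right_iff]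
    exact List.forall₂_same.mpr (fun k _ => PySem.List.sorted_perm _ _ _)
  have step2 : ((SK.map (fun k => xs.filter (fun x => pyPrefix x == k))).flatten).Perm
      ((K.map (fun k => xs.filter (fun x => pyPrefix x == k))).flatten) :=
    List.Perm.flatten ((PySem.List.sorted_perm K (fun x => x) false).map _)
  have step3 : ((K.map (fun k => xs.filter (fun x => pyPrefix x == k))).flatten).Perm xs := by
    apply partition_perm xs K (hK ▸ PySem.Set.nodup_ofList _)
    intro x hx
    rw [hK]
    exact (PySem.Set.mem_ofList _ _).mpr (List.mem_map_of_mem hx)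
  exact (step1.trans step2).trans step3

theorem a_pairwise (xs : List String) :
    (sort_weight_types_py xs).Pairwise (fun a b => wkey a ≤ wkey b) := by
  rw [a_eq_structured, List.pairwise_flatten]
  set K : List String := PySem.Set.ofList (xs.map pyPrefix) with hK
  set SK : List String := PySem.List.sorted K (fun x => x) false with hSK
  have hmem : ∀ k (a : String),
      a ∈ PySem.List.sorted (xs.filter (fun x => pyPrefix x == k)) (fun x => x) false →
      pyPrefix a = k := by
    intro k a ha
    have := (PySem.List.mem_sorted _ _ _ _).mp ha
    exact beq_iff_eq.mp (List.mem_filter.mp this).2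
  constructor
  · intro l hl
    rcases List.mem_map.mp hl with ⟨k, _, rfl⟩
    apply (PySem.List.sorted_pairwise (xs.filter (fun x => pyPrefix x == k))
        (fun x => x)).imp_of_mem
    intro a b ha hb hab
    exact Prod.Lex.toLex_le_toLex.mpr (Or.inr ⟨(hmem k a ha).trans (hmem k b hb).symm, hab⟩)
  · have hskpair : SK.Pairwise (· < ·) := by
      rw [hSK, hK]; exact PySem.List.sorted_ofList_pairwise_lt _
    apply List.pairwise_map.mpr
    apply hskpair.imp_of_mem
    intro k1 k2 _ _ hlt a ha b hb
    exact Prod.Lex.toLex_le_toLex.mpr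
      (Or.inl ((hmem k1 a ha).symm ▸ (hmem k2 b hb).symm ▸ hlt))

-- ===== VERDICT (by name: the statement is the Claim_ definition above) =====
theorem sort_weight_types_py_spec : Claim_equal_sort_weight_types_py := by
  intro xs _
  show sort_weight_types_py xs = sort_weight_types_py_alt xs
  exact PySem.List.eq_of_perm_of_pairwise_le_of_injective wkey wkey_injective
    ((a_perm xs).trans (alt_perm xs).symm) (a_pairwise xs) (alt_pairwise xs)
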